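-- pv_equiv track=rewrite | github.com/TIKTOKDAD/AllControlBase | tools/tuning/analyze_frame_rate.py | analyze_state_transitions
-- ===== SOURCE A (Python) =====
-- from typing import Dict, List, Any, Optional
-- from collections import defaultdict
--
-- def analyze_state_transitions(samples: List[Dict[str, Any]]) -> Dict[str, Any]:
--     """分析状态转换"""
--     state_names = {
--         0: 'INIT',
--         1: 'NORMAL',
--         2: 'SOFT_DISABLED',
--         3: 'MPC_DEGRADED',
--         4: 'BACKUP_ACTIVE',
--         5: 'STOPPING',
--         6: 'STOPPED',
--     }
--
--     state_counts = defaultdict(int)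
--     transitions = defaultdict(int)
--
--     prev_state = None
--     for sample in samples:
--         state = sample.get('state', 0)
--         state_counts[state] += 1
--
--         if prev_state is not None and state != prev_state:
--             transition_key = f"{state_names.get(prev_state, str(prev_state))} -> {state_names.get(state, str(state))}"
--             transitions[transition_key] += 1
--
--         prev_state = state
--
--     return {
--         'state_distribution': {state_names.get(k, str(k)): v for k, v in state_counts.items()},
--         'transitions': dict(transitions),
--     }
-- ===== SOURCE B (Python) =====
-- from typing import Dict, List, Any
--
-- def analyze_state_transitions(samples: List[Dict[str, Any]]) -> Dict[str, Any]:
--     """分析状态转换 (run-length-encoding re-implementation: runs, then sums and boundaries)"""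
--     state_names = {
--         0: 'INIT',
--         1: 'NORMAL',
--         2: 'SOFT_DISABLED',
--         3: 'MPC_DEGRADED',
--         4: 'BACKUP_ACTIVE',
--         5: 'STOPPING',
--         6: 'STOPPED',
--     }
--
--     def label(k):
--         return state_names.get(k, str(k))
--
--     states = [s.get('state', 0) for s in samples]
--
--     # run-length encode states into maximal runs of one repeated state
--     runs = []
--     i, n = 0, len(states)
--     while i < n:
--         j = i + 1
--         while j < n and states[j] == states[i]:
--             j += 1
--         runs.append((states[i], j - i))
--         i = j
--
--     # occurrence counts: add whole run lengths per state
--     counts = {}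
--     for st, length in runs:
--         counts[st] = counts.get(st, 0) + length
--
--     # transitions: every boundary between two runs is exactly one transition
--     transitions = {}
--     for k in range(1, len(runs)):
--         key = f"{label(runs[k - 1][0])} -> {label(runs[k][0])}"
--         transitions[key] = transitions.get(key, 0) + 1
--
--     return {
--         'state_distribution': {label(k): v for k, v in counts.items()},
--         'transitions': transitions,
--     }
-- ===== Notes on version B (the rewrite author's own statement) =====
-- stated objective: alternative
-- what changed: Replaces A's fused per-sample loop with prev_state tracking by a run-length encoding of the state sequence: occurrence counts are sums of run lengths and each boundary between adjacent runs is exactly one transition (no equality test in the transition pass).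
import Mathlib
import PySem

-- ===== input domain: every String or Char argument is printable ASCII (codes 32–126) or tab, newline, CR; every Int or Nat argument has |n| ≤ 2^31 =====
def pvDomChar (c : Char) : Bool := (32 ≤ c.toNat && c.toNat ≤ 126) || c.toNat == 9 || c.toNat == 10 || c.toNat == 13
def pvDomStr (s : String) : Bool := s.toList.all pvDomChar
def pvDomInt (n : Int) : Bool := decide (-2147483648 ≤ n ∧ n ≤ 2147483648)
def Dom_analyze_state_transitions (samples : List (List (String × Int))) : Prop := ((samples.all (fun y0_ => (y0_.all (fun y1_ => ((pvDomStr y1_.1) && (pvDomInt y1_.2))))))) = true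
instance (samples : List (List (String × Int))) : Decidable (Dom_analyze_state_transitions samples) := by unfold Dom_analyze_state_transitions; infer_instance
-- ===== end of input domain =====

-- B re-implements A by run-length encoding the state sequence: counts are sums of run lengths and
-- each run boundary is one transition; same cost, a different algorithm.

-- ===== PORT A =====
-- the state_names table and sample.get('state', 0), identical expressions in both Pythons
def pvStateNames : PySem.Dict Int String :=
  PySem.Dict.ofList [(0, "INIT"), (1, "NORMAL"), (2, "SOFT_DISABLED"), (3, "MPC_DEGRADED"),
                     (4, "BACKUP_ACTIVE"), (5, "STOPPING"), (6, "STOPPED")]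

def pvGetState (sample : List (String × Int)) : Int :=
  (PySem.Dict.mk sample).getD "state" 0

-- the body of A's single for-loop: state (counts, transitions, prev_state)
def pvStepA (acc : PySem.Dict Int Int × PySem.Dict String Int × Option Int)
    (sample : List (String × Int)) :
    PySem.Dict Int Int × PySem.Dict String Int × Option Int :=
  let state := pvGetState sample
  let counts := acc.1.modify state 0 (· + 1)
  let trans :=
    match acc.2.2 with
    | some p =>
        if state ≠ p then
          acc.2.1.modify
            (pvStateNames.getD p (PySem.Int.toStr p) ++ " -> " ++
             pvStateNames.getD state (PySem.Int.toStr state)) 0 (· + 1)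
        else acc.2.1
    | none => acc.2.1
  (counts, trans, some state)

def analyze_state_transitions (samples : List (List (String × Int))) :
    List (String × List (String × Int)) :=
  let r := samples.foldl pvStepA (PySem.Dict.empty, PySem.Dict.empty, none)
  -- {state_names.get(k, str(k)): v for k, v in state_counts.items()}
  let dist := r.1.items.foldl
    (fun d kv => d.insert (pvStateNames.getD kv.1 (PySem.Int.toStr kv.1)) kv.2) PySem.Dict.empty
  [("state_distribution", dist.items), ("transitions", r.2.1.items)]

-- ===== PORT B =====
def pvLabel (k : Int) : String := pvStateNames.getD k (PySem.Int.toStr k)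

-- Source B's while loop: consume one maximal run of equal states per outer step
-- (the inner `while j < n and states[j] == states[i]` is the takeWhile/dropWhile scan)
def pvRuns : List Int → List (Int × Int)
  | [] => []
  | s :: rest =>
      (s, 1 + ((rest.takeWhile (fun t => t == s)).length : Int)) ::
        pvRuns (rest.dropWhile (fun t => t == s))
  termination_by l => l.length
  decreasing_by
    simp only [List.length_cons]
    exact Nat.lt_succ_of_le (List.length_dropWhile_le _ _)

def analyze_state_transitions_alt (samples : List (List (String × Int))) :
    List (String × List (String × Int)) :=
  let states := samples.map pvGetState
  let runs := pvRuns states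
  let counts := runs.foldl (fun d r => d.insert r.1 (d.getD r.1 0 + r.2)) PySem.Dict.empty
  -- `for k in range(1, len(runs))` over adjacent run pairs, ported as zip of runs with its tail
  let trans := (runs.zip runs.tail).foldl
    (fun d pr =>
      let k := pvLabel pr.1.1 ++ " -> " ++ pvLabel pr.2.1
      d.insert k (d.getD k 0 + 1)) PySem.Dict.empty
  let dist := counts.items.foldl (fun d kv => d.insert (pvLabel kv.1) kv.2) PySem.Dict.empty
  [("state_distribution", dist.items), ("transitions", trans.items)]

-- ===== PRECONDITION & SPEC =====
def Spec_analyze_state_transitions (samples : List (List (String × Int))) (out : List (String × List (String × Int))) : Prop := out = analyze_state_transitions_alt samples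
instance (samples : List (List (String × Int))) (out : List (String × List (String × Int))) : Decidable (Spec_analyze_state_transitions samples out) := by unfold Spec_analyze_state_transitions; infer_instance

-- ===== CLAIM (what is proved, stated in full; the proofs are below) =====
def Claim_equal_analyze_state_transitions : Prop := ∀ (samples : List (List (String × Int))), Dom_analyze_state_transitions samples → Spec_analyze_state_transitions samples (analyze_state_transitions samples)

-- ===== LEMMAS AND PROOFS =====

-- consecutive pairs still to be processed, given the current prev_state
def pvPairs (p : Option Int) (sts : List Int) : List (Int × Int) :=
  match p with
  | none => sts.zip sts.tail
  | some q => (q :: sts).zip sts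

def pvLastO (p : Option Int) (sts : List Int) : Option Int :=
  match sts with
  | [] => p
  | s :: rest => pvLastO (some s) rest

-- element-level shapes of A's two accumulations
def pvCF (d : PySem.Dict Int Int) (sts : List Int) : PySem.Dict Int Int :=
  sts.foldl (fun d st => d.insert st (d.getD st 0 + 1)) d

def pvPF (t : PySem.Dict String Int) (prs : List (Int × Int)) : PySem.Dict String Int :=
  prs.foldl
    (fun d pr =>
      if pr.1 ≠ pr.2 then
        let k := pvLabel pr.1 ++ " -> " ++ pvLabel pr.2
        d.insert k (d.getD k 0 + 1)
      else d) t

lemma pvPF_cons_eq {pr : Int × Int} (t : PySem.Dict String Int) (h : pr.1 = pr.2)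
    {prs : List (Int × Int)} : pvPF t (pr :: prs) = pvPF t prs := by
  unfold pvPF
  rw [List.foldl_cons]
  simp [h]

lemma pvPF_cons_ne {pr : Int × Int} (t : PySem.Dict String Int) (h : pr.1 ≠ pr.2)
    {prs : List (Int × Int)} :
    pvPF t (pr :: prs) =
      pvPF (t.insert (pvLabel pr.1 ++ " -> " ++ pvLabel pr.2)
        (t.getD (pvLabel pr.1 ++ " -> " ++ pvLabel pr.2) 0 + 1)) prs := by
  unfold pvPF
  rw [List.foldl_cons]
  simp [h]

-- A's fused loop splits into an element-wise counting fold and a consecutive-pair fold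
lemma pvFoldA_split (L : List (List (String × Int))) (c : PySem.Dict Int Int)
    (t : PySem.Dict String Int) (p : Option Int) :
    L.foldl pvStepA (c, t, p) =
      (pvCF c (L.map pvGetState),
       pvPF t (pvPairs p (L.map pvGetState)),
       pvLastO p (L.map pvGetState)) := by
  induction L generalizing c t p with
  | nil => cases p <;> rfl
  | cons s L ih =>
      simp only [List.foldl_cons, List.map_cons]
      rw [ih]
      cases p with
      | none => rfl
      | some q =>
          have hz : pvPairs (some q) (pvGetState s :: List.map pvGetState L)
              = (q, pvGetState s) :: pvPairs (some (pvGetState s)) (List.map pvGetState L) := rfl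
          rw [hz]
          by_cases h : pvGetState s = q
          · simp [pvStepA, pvPF, pvCF, pvLabel, pvLastO, PySem.Dict.modify, h]
          · simp [pvStepA, pvPF, pvCF, pvLabel, pvLastO, PySem.Dict.modify, h, Ne.symm h]

-- counting a run of k+1 copies of s at once
lemma pvCF_replicate (k : Nat) (s : Int) (d : PySem.Dict Int Int) :
    pvCF d (s :: List.replicate k s) = d.insert s (d.getD s 0 + (1 + (k : Int))) := by
  induction k generalizing d with
  | zero => simp [pvCF]
  | succ k ih =>
      have : (s :: List.replicate (k+1) s) = s :: s :: List.replicate k s := by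
        simp [List.replicate_succ]
      rw [this]
      show pvCF (d.insert s (d.getD s 0 + 1)) (s :: List.replicate k s) = _
      rw [ih]
      rw [PySem.Dict.getD_insert_self, PySem.Dict.insert_insert_self]
      congr 1
      push_cast
      ring

-- a takeWhile (== s) block is a replicate of s
lemma pvTakeWhile_replicate (s : Int) (l : List Int) :
    l.takeWhile (fun t => t == s) = List.replicate (l.takeWhile (fun t => t == s)).length s := by
  apply List.eq_replicate_of_mem
  intro b hb
  have := List.mem_takeWhile_imp hb
  simpa using this

-- the pair fold skips the (s, s) pairs inside a run
lemma pvPF_skip (k : Nat) (s : Int) (rest : List Int) (t : PySem.Dict String Int) :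
    pvPF t (pvPairs (some s) (List.replicate k s ++ rest)) = pvPF t (pvPairs (some s) rest) := by
  induction k generalizing t with
  | zero => simp
  | succ k ih =>
      have : pvPairs (some s) (List.replicate (k+1) s ++ rest)
          = (s, s) :: pvPairs (some s) (List.replicate k s ++ rest) := by
        simp [List.replicate_succ, pvPairs]
      rw [this, pvPF_cons_eq t rfl]
      exact ih t

-- head of dropWhile fails the predicate
lemma pvDropWhile_head {s e : Int} {l l' : List Int}
    (h : l.dropWhile (fun t => t == s) = e :: l') : e ≠ s := by
  have hne : l.dropWhile (fun t => t == s) ≠ [] := by simp [h]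
  have := List.head_dropWhile_not (fun t => t == s) hne
  simp only [h] at this
  simpa using this

-- counts: element-wise fold = run-wise fold
lemma pvCount_runs (sts : List Int) (d : PySem.Dict Int Int) :
    pvCF d sts = (pvRuns sts).foldl (fun d r => d.insert r.1 (d.getD r.1 0 + r.2)) d := by
  induction sts using pvRuns.induct generalizing d with
  | case1 => simp [pvRuns, pvCF]
  | case2 s rest ih =>
      rw [pvRuns]
      have hsplit : s :: rest
          = (s :: List.replicate (rest.takeWhile (fun t => t == s)).length s)
            ++ rest.dropWhile (fun t => t == s) := by
        conv_lhs => rw [← List.takeWhile_append_dropWhile (p := fun t => t == s) (l := rest)]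
        rw [← pvTakeWhile_replicate]
        rfl
      rw [hsplit]
      show pvCF d _ = _
      unfold pvCF
      rw [List.foldl_append]
      show (rest.dropWhile (fun t => t == s)).foldl _
        (pvCF d (s :: List.replicate (rest.takeWhile (fun t => t == s)).length s)) = _
      rw [pvCF_replicate, List.foldl_cons]
      exact ih _

-- transitions: the guarded pair fold over states = the unguarded fold over run boundaries
lemma pvTrans_runs (sts : List Int) (t : PySem.Dict String Int) :
    pvPF t (pvPairs none sts) =
      ((pvRuns sts).zip (pvRuns sts).tail).foldl
        (fun d pr =>
          let k := pvLabel pr.1.1 ++ " -> " ++ pvLabel pr.2.1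
          d.insert k (d.getD k 0 + 1)) t := by
  induction sts using pvRuns.induct generalizing t with
  | case1 => simp [pvRuns, pvPairs, pvPF]
  | case2 s rest ih =>
      have h0 : pvPairs none (s :: rest) = pvPairs (some s) rest := rfl
      rw [h0]
      conv_lhs => rw [← List.takeWhile_append_dropWhile (p := fun t => t == s) (l := rest),
                      pvTakeWhile_replicate]
      rw [pvPF_skip]
      rw [pvRuns]
      cases hdw : rest.dropWhile (fun t => t == s) with
      | nil => simp [pvRuns, pvPairs, pvPF]
      | cons e l' =>
          have hne : e ≠ s := pvDropWhile_head hdw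
          have h1 : pvPairs (some s) (e :: l') = (s, e) :: pvPairs (some e) l' := rfl
          have h2 : pvPairs (some e) l' = pvPairs none (e :: l') := rfl
          rw [h1, pvPF_cons_ne t (Ne.symm hne), h2]
          rw [hdw] at ih
          rw [ih]
          rw [pvRuns]
          rfl

-- ===== VERDICT (by name: the statement is the Claim_ definition above) =====
theorem analyze_state_transitions_spec : Claim_equal_analyze_state_transitions := by
  intro samples _
  unfold Spec_analyze_state_transitions
  unfold analyze_state_transitions analyze_state_transitions_alt
  rw [pvFoldA_split]
  simp only
  rw [pvCount_runs, pvTrans_runs]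
  rfl
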